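-- pv_equiv track=rewrite | github.com/pypi-data/pypi-mirror-399 | packages/bardic/bardic-0.6.1-py3-none-any.whl/bardic/compiler/parsing/blocks.py | _extract_py_old_syntax
-- ===== SOURCE A (Python) =====
-- def _extract_py_old_syntax(lines: list[str], start_index: int) -> tuple[str, int]:
--     """Extract <<py ... >> block (existing logic)."""
--     # Skip the opening <<py line
--     i = start_index + 1
--     code_lines = []
--
--     # Find the base indentation (first non-empty line)
--     base_indent = None
--
--     while i < len(lines):
--         line = lines[i]
--
--         # Check for closing >>
--         if line.strip() == ">>":
--             break
--
--         # Determine base indentation from first real line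
--         if base_indent is None and line.strip():
--             base_indent = len(line) - len(line.lstrip())
--
--         # Remove base indentation, preserve relative indentation
--         if base_indent is not None and line.strip():
--             # Remove only the base indentation
--             if len(line) >= base_indent and line[:base_indent].strip() == "":
--                 adjusted_line = line[base_indent:]
--             else:
--                 adjusted_line = line
--             code_lines.append(adjusted_line)
--         elif not line.strip():
--             # Preserve empty lines
--             code_lines.append("")
--         else:
--             # First line or line with no indent
--             code_lines.append(line)
--
--         i += 1
--
--     # Join code lines
--     code = "\n".join(code_lines)
--
--     # Return code and number of lines consumed (including opening and closing)
--     lines_consumed = i - start_index + 1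
--
--     return code, lines_consumed
-- ===== SOURCE B (Python) =====
-- def _extract_py_old_syntax(lines: list[str], start_index: int) -> tuple[str, int]:
--     """Extract <<py ... >> block: find the closing line first, then process the slice."""
--     # Pass 1: find the index of the closing '>>' line (or stop at len(lines)).
--     end = start_index + 1
--     while end < len(lines) and lines[end].strip() != ">>":
--         end += 1
--
--     # Pass 2: base indentation = indent of the first non-empty line of the block.
--     base = None
--     for j in range(start_index + 1, end):
--         if lines[j].strip():
--             base = len(lines[j]) - len(lines[j].lstrip())
--             break
--
--     # Pass 3: build the code lines.
--     code_lines = []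
--     for j in range(start_index + 1, end):
--         line = lines[j]
--         if not line.strip():
--             code_lines.append("")
--         elif line[:base].strip() == "":
--             code_lines.append(line[base:])
--         else:
--             code_lines.append(line)
--
--     return "\n".join(code_lines), end - start_index + 1
-- ===== Notes on version B (the rewrite author's own statement) =====
-- stated objective: alternative
-- what changed: A's single stateful loop (threading index, optional base indent and accumulator) is replaced by three independent passes: first locate the closing '>>' line, then read the base indent off the first non-empty line of the slice, then map each line of the slice to its dedented form.
import Mathlib
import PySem

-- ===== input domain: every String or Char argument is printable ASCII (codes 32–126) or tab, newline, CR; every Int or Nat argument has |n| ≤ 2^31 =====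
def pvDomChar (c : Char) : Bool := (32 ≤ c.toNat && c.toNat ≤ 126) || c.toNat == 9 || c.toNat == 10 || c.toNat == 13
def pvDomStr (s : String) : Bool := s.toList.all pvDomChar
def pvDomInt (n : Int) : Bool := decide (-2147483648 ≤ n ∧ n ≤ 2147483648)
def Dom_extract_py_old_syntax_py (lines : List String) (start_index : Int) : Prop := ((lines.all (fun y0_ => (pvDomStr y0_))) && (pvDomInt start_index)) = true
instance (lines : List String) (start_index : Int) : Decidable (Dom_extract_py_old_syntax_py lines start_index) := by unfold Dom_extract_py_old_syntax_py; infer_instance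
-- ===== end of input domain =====

-- B replaces A's single stateful loop by three independent passes (find end, find base indent, dedent); equivalence of the return values on all inputs where A does not raise.

-- ===== PORT A =====
-- the while loop of A: returns the final value of `i` and the accumulated `code_lines`
-- (the `none` branch of pyGet? is Python's IndexError, excluded by Pre_)
def pvAStep (lines : List String) (i : Int) (base : Option Int) : Int × List String :=
  if _h : i < (lines.length : Int) then
    match PySem.List.pyGet? lines i with
    | none => (i, [])   -- IndexError in Python; outside Pre_
    | some line =>
      if PySem.Str.strip line = ">>" then (i, [])
      else
        let base1 : Option Int :=
          if base = none ∧ PySem.Str.strip line ≠ "" then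
            some (PySem.Str.len line - PySem.Str.len (PySem.Str.lstrip line))
          else base
        let entry : String :=
          if base1 ≠ none ∧ PySem.Str.strip line ≠ "" then
            match base1 with
            | some b =>
              if PySem.Str.len line ≥ b ∧ PySem.Str.strip (PySem.Str.slice line none (some b)) = ""
              then PySem.Str.slice line (some b) none
              else line
            | none => line   -- unreachable: base1 ≠ none in this branch
          else if PySem.Str.strip line = "" then ""
          else line
        let rest := pvAStep lines (i + 1) base1
        (rest.1, entry :: rest.2)
  else (i, [])
termination_by ((lines.length : Int) - i).toNat
decreasing_by omega

def extract_py_old_syntax_py (lines : List String) (start_index : Int) : String × Int :=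
  let r := pvAStep lines (start_index + 1) none
  (PySem.Str.join "\n" r.2, r.1 - start_index + 1)

-- ===== PORT B =====
-- pass 1: find the index of the closing '>>' line (or len(lines))
def pvFindEnd (lines : List String) (e : Int) : Int :=
  if _h : e < (lines.length : Int) then
    match PySem.List.pyGet? lines e with
    | none => e   -- IndexError in Python; outside Pre_
    | some l => if PySem.Str.strip l = ">>" then e else pvFindEnd lines (e + 1)
  else e
termination_by ((lines.length : Int) - e).toNat
decreasing_by omega

def pvIndent (line : String) : Int :=
  PySem.Str.len line - PySem.Str.len (PySem.Str.lstrip line)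

def pvAdjust (base : Option Int) (line : String) : String :=
  if PySem.Str.strip line = "" then ""
  else
    match base with
    | none => line   -- line[:None] is the whole line; it is non-blank, so kept as-is
    | some b =>
      if PySem.Str.strip (PySem.Str.slice line none (some b)) = ""
      then PySem.Str.slice line (some b) none
      else line

def extract_py_old_syntax_py_alt (lines : List String) (start_index : Int) : String × Int :=
  let e := pvFindEnd lines (start_index + 1)
  let block := (PySem.List.pyRange (start_index + 1) e).map
    (fun j => (PySem.List.pyGet? lines j).getD "")
  let base := (block.find? (fun l => !(PySem.Str.strip l = ""))).map pvIndent
  (PySem.Str.join "\n" (block.map (pvAdjust base)), e - start_index + 1)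

-- ===== PRECONDITION & SPEC =====
-- Pre_ excludes exactly the inputs where A raises IndexError: start_index + 1 below -len(lines)
-- (Python's negative indexing makes the first access lines[start_index+1] raise there).
def Pre_extract_py_old_syntax_py (lines : List String) (start_index : Int) : Prop :=
  -(lines.length : Int) ≤ start_index + 1
instance (lines : List String) (start_index : Int) : Decidable (Pre_extract_py_old_syntax_py lines start_index) := by unfold Pre_extract_py_old_syntax_py; infer_instance

def pvWitness_extract_py_old_syntax_py : List String × Int := (["<<py", "  x = 1", "", "    y = 2", ">>"], 0)

def Spec_extract_py_old_syntax_py (lines : List String) (start_index : Int) (out : String × Int) : Prop := out = extract_py_old_syntax_py_alt lines start_index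
instance (lines : List String) (start_index : Int) (out : String × Int) : Decidable (Spec_extract_py_old_syntax_py lines start_index out) := by unfold Spec_extract_py_old_syntax_py; infer_instance

-- ===== CLAIM (what is proved, stated in full; the proofs are below) =====
def Claim_equal_extract_py_old_syntax_py : Prop := ∀ (lines : List String) (start_index : Int), Dom_extract_py_old_syntax_py lines start_index → Pre_extract_py_old_syntax_py lines start_index → Spec_extract_py_old_syntax_py lines start_index (extract_py_old_syntax_py lines start_index)

-- ===== LEMMAS AND PROOFS =====


-- B's block of raw lines between i and the closing line
def pvBlock (lines : List String) (i : Int) : List String :=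
  (PySem.List.pyRange i (pvFindEnd lines i)).map (fun j => (PySem.List.pyGet? lines j).getD "")

lemma pvRange_nil {a b : Int} (h : b ≤ a) : PySem.List.pyRange a b = [] := by
  simp only [PySem.List.pyRange, one_ne_zero, ↓reduceIte, one_mul, zero_lt_one,
    add_sub_cancel_right, EuclideanDomain.div_one, List.map_eq_nil_iff, List.range_eq_nil,
    ite_eq_right_iff, Int.toNat_eq_zero, tsub_le_iff_right, zero_add, h, implies_true]

lemma pvFindEnd_ge (lines : List String) (i : Int) : i ≤ pvFindEnd lines i := by
  unfold pvFindEnd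
  split
  · split
    · omega
    · split
      · omega
      · have := pvFindEnd_ge lines (i + 1); omega
  · omega
termination_by ((lines.length : Int) - i).toNat
decreasing_by omega

lemma pvGet_some (lines : List String) (i : Int)
    (h1 : -(lines.length : Int) ≤ i) (h2 : i < (lines.length : Int)) :
    ∃ l, PySem.List.pyGet? lines i = some l := by
  simp only [PySem.List.pyGet?, PySem.List.pyIdx?]
  by_cases h0 : 0 ≤ i
  · rw [if_pos h0, if_pos (by omega)]
    refine ⟨lines[i.toNat]'(by omega), ?_⟩
    simp [List.getElem?_eq_getElem (show i.toNat < lines.length by omega)]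
  · rw [if_neg h0, if_pos (by omega)]
    refine ⟨lines[lines.length - (-i).toNat]'(by omega), ?_⟩
    simp [List.getElem?_eq_getElem (show lines.length - (-i).toNat < lines.length by omega)]

lemma pvFindEnd_of_ge (lines : List String) (i : Int) (h : (lines.length : Int) ≤ i) :
    pvFindEnd lines i = i := by
  unfold pvFindEnd; rw [dif_neg (by omega)]

lemma pvFindEnd_stop (lines : List String) (i : Int) (l : String) (hlt : i < (lines.length : Int))
    (hl : PySem.List.pyGet? lines i = some l) (hs : PySem.Str.strip l = ">>") :
    pvFindEnd lines i = i := by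
  conv_lhs => rw [pvFindEnd]
  rw [dif_pos hlt, hl]; simp [hs]

lemma pvFindEnd_step (lines : List String) (i : Int) (l : String) (hlt : i < (lines.length : Int))
    (hl : PySem.List.pyGet? lines i = some l) (hs : ¬ PySem.Str.strip l = ">>") :
    pvFindEnd lines i = pvFindEnd lines (i + 1) := by
  conv_lhs => rw [pvFindEnd]
  rw [dif_pos hlt, hl]; simp [hs]

lemma pvBlock_nil (lines : List String) (i : Int) (h : pvFindEnd lines i = i) :
    pvBlock lines i = [] := by
  unfold pvBlock; rw [h, pvRange_nil le_rfl]; rfl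

lemma pvBlock_cons (lines : List String) (i : Int) (l : String) (hlt : i < (lines.length : Int))
    (hl : PySem.List.pyGet? lines i = some l) (hs : ¬ PySem.Str.strip l = ">>") :
    pvBlock lines i = l :: pvBlock lines (i + 1) := by
  have he : pvFindEnd lines i = pvFindEnd lines (i + 1) := pvFindEnd_step lines i l hlt hl hs
  have hgt : i < pvFindEnd lines i := by
    have := pvFindEnd_ge lines (i + 1); omega
  unfold pvBlock
  rw [he] at hgt ⊢
  rw [PySem.List.pyRange_one_cons hgt, List.map_cons, hl]
  rfl

-- the entry A appends for a non-blank line with base already set equals B's pvAdjust at that base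
lemma pvEntry_eq (line : String) (b : Int) (hnb : ¬ PySem.Str.strip line = "") :
    (if PySem.Str.len line ≥ b ∧ PySem.Str.strip (PySem.Str.slice line none (some b)) = ""
     then PySem.Str.slice line (some b) none else line) = pvAdjust (some b) line := by
  unfold pvAdjust
  rw [if_neg hnb]
  dsimp only
  by_cases hc : PySem.Str.strip (PySem.Str.slice line none (some b)) = ""
  · by_cases hl : PySem.Str.len line ≥ b
    · rw [if_pos ⟨hl, hc⟩, if_pos hc]
    · -- b exceeds the length, so line[:b] is the whole (non-blank) line: contradiction with hc
      exfalso
      apply hnb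
      have hlen : PySem.Str.len line = (line.toList.length : Int) := PySem.Str.len_eq line
      have hwhole : PySem.Str.slice line none (some b) = line := by
        apply String.toList_inj.mp
        rw [PySem.Str.toList_slice, PySem.Chars.slice_eq_listSlice]
        have h2 := PySem.List.slice_to (xs := line.toList) (b := b) (by omega)
        rw [h2]
        exact List.take_of_length_le (by omega)
      rw [hwhole] at hc
      exact hc
  · rw [if_neg (fun hand => hc hand.2), if_neg hc]

-- blank lines always map to ""
lemma pvAdjust_blank (base : Option Int) (line : String) (hb : PySem.Str.strip line = "") :
    pvAdjust base line = "" := by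
  unfold pvAdjust; rw [if_pos hb]

-- main invariant, base already fixed: A's loop computes B's mapped block
lemma pvMain_some (lines : List String) (i : Int) (b : Int)
    (h : -(lines.length : Int) ≤ i) :
    pvAStep lines i (some b) = (pvFindEnd lines i, (pvBlock lines i).map (pvAdjust (some b))) := by
  by_cases hlt : i < (lines.length : Int)
  · obtain ⟨line, hline⟩ := pvGet_some lines i h hlt
    rw [pvAStep, dif_pos hlt, hline]
    dsimp only
    by_cases hs : PySem.Str.strip line = ">>"
    · rw [if_pos hs, pvFindEnd_stop lines i line hlt hline hs,
        pvBlock_nil lines i (pvFindEnd_stop lines i line hlt hline hs)]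
      rfl
    · rw [if_neg hs]
      simp only [reduceCtorEq, false_and, ite_false, ne_eq, not_false_eq_true, true_and]
      rw [pvMain_some lines (i + 1) b (by omega)]
      rw [pvFindEnd_step lines i line hlt hline hs, pvBlock_cons lines i line hlt hline hs,
        List.map_cons]
      by_cases hnb : PySem.Str.strip line = ""
      · rw [if_neg (by simp [hnb]), if_pos hnb, pvAdjust_blank _ _ hnb]
      · rw [if_pos hnb, pvEntry_eq line b hnb]
  · rw [pvAStep, dif_neg hlt, pvFindEnd_of_ge lines i (by omega),
      pvBlock_nil lines i (pvFindEnd_of_ge lines i (by omega))]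
    rfl
termination_by ((lines.length : Int) - i).toNat
decreasing_by omega

-- main invariant, base not yet found: A's loop computes B's block with the base B finds
lemma pvMain_none (lines : List String) (i : Int)
    (h : -(lines.length : Int) ≤ i) :
    pvAStep lines i none = (pvFindEnd lines i,
      (pvBlock lines i).map
        (pvAdjust (((pvBlock lines i).find? (fun l => !(PySem.Str.strip l = ""))).map pvIndent))) := by
  by_cases hlt : i < (lines.length : Int)
  · obtain ⟨line, hline⟩ := pvGet_some lines i h hlt
    rw [pvAStep, dif_pos hlt, hline]
    dsimp only
    by_cases hs : PySem.Str.strip line = ">>"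
    · rw [if_pos hs, pvFindEnd_stop lines i line hlt hline hs,
        pvBlock_nil lines i (pvFindEnd_stop lines i line hlt hline hs)]
      rfl
    · rw [if_neg hs, pvFindEnd_step lines i line hlt hline hs,
        pvBlock_cons lines i line hlt hline hs]
      by_cases hnb : PySem.Str.strip line = ""
      · -- blank line: base stays none, the entry is ""
        rw [if_neg (by simp [hnb])]
        simp only [ne_eq, not_true_eq_false, false_and, ite_false, if_pos hnb]
        rw [pvMain_none lines (i + 1) (by omega)]
        rw [List.find?_cons_of_neg (by simp [hnb]), List.map_cons, pvAdjust_blank _ _ hnb]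
      · -- first non-blank line: base becomes its indent
        rw [if_pos ⟨rfl, hnb⟩]
        simp only [ne_eq, reduceCtorEq, not_false_eq_true, true_and, if_pos hnb]
        rw [pvMain_some lines (i + 1) _ (by omega)]
        rw [List.find?_cons_of_pos (by simp [hnb]), List.map_cons, Option.map_some,
          pvEntry_eq line _ hnb]
        rfl
  · rw [pvAStep, dif_neg hlt, pvFindEnd_of_ge lines i (by omega),
      pvBlock_nil lines i (pvFindEnd_of_ge lines i (by omega))]
    rfl
termination_by ((lines.length : Int) - i).toNat
decreasing_by omega

-- ===== VERDICT (by name: the statement is the Claim_ definition above) =====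
theorem extract_py_old_syntax_py_spec : Claim_equal_extract_py_old_syntax_py := by
  intro lines start_index _hdom hpre
  unfold Spec_extract_py_old_syntax_py extract_py_old_syntax_py extract_py_old_syntax_py_alt
  have := pvMain_none lines (start_index + 1) hpre
  simp only [this, pvBlock]
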